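-- pv_equiv track=rewrite | github.com/kses1010/algorithm | programmers/level2/camouflage.py | solution
-- ===== SOURCE A (Python) =====
-- def solution(clothes):
--     answer = {}
--     for i in clothes:
--         if i[1] in answer:
--             answer[i[1]] += 1
--         else:
--             answer[i[1]] = 1
--     count = 1
--     for i in answer.values():
--         count *= (i + 1)
--     return answer
-- ===== SOURCE B (Python) =====
-- def solution(clothes):
--     types = []
--     for c in clothes:
--         if c[1] not in types:
--             types.append(c[1])
--     keys = [c[1] for c in clothes]
--     return {t: keys.count(t) for t in types}
-- ===== Notes on version B (the rewrite author's own statement) =====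
-- stated objective: simpler
-- what changed: Drops A's dead count-product loop and replaces the single accumulating dict pass by a two-phase decomposition: collect the types in first-appearance order, then build the dict by counting each type with list.count.
import Mathlib
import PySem

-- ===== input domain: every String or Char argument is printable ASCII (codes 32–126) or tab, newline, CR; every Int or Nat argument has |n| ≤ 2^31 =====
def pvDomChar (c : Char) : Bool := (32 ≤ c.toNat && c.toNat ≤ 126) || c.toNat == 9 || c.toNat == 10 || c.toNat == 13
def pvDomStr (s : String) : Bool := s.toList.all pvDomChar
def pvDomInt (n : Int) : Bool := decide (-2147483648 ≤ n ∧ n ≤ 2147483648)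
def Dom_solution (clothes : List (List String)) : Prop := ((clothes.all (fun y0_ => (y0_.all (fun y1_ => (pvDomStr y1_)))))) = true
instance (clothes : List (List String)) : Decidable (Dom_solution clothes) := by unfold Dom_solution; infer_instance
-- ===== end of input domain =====

-- B drops A's dead count-product loop and uses a two-phase decomposition (first-appearance
-- type list, then a counting pass per type) instead of A's single accumulating dict pass;
-- same return value, objective: simpler.

-- ===== PORT A =====
-- i[1] (raises IndexError when the inner list is shorter than 2; such inputs are excluded by Pre_)
def pvKey (i : List String) : String := (PySem.List.pyGet? i 1).getD ""

def solution (clothes : List (List String)) : List (String × Int) :=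
  let answer : PySem.Dict String Int :=
    clothes.foldl (fun answer i =>
      match answer.get? (pvKey i) with
      | some v => answer.insert (pvKey i) (v + 1)
      | none   => answer.insert (pvKey i) 1) PySem.Dict.empty
  -- dead code in A: count = 1; for i in answer.values(): count *= (i + 1)
  let _count : Int := answer.values.foldl (fun c i => c * (i + 1)) 1
  answer.items

-- ===== PORT B =====
def solution_alt (clothes : List (List String)) : List (String × Int) :=
  let types : List String :=
    clothes.foldl (fun ts c => if pvKey c ∈ ts then ts else ts ++ [pvKey c]) []
  let keys : List String := clothes.map pvKey
  types.map (fun t => (t, (keys.count t : Int)))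

-- ===== PRECONDITION & SPEC =====
-- Pre_ excludes exactly the inputs on which A raises IndexError at i[1] (an inner list of length < 2).
def Pre_solution (clothes : List (List String)) : Prop := ∀ i ∈ clothes, 2 ≤ i.length
instance (clothes : List (List String)) : Decidable (Pre_solution clothes) := by unfold Pre_solution; infer_instance

def pvWitness_solution : List (List String) := [["a", "shirt"], ["b", "hat"], ["c", "shirt"]]

def Spec_solution (clothes : List (List String)) (out : List (String × Int)) : Prop := out = solution_alt clothes
instance (clothes : List (List String)) (out : List (String × Int)) : Decidable (Spec_solution clothes out) := by unfold Spec_solution; infer_instance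

-- ===== CLAIM (what is proved, stated in full; the proofs are below) =====
def Claim_equal_solution : Prop := ∀ (clothes : List (List String)), Dom_solution clothes → Pre_solution clothes → Spec_solution clothes (solution clothes)

-- ===== LEMMAS AND PROOFS =====

-- A's branch on get? is exactly the insert-getD+1 counting step.
theorem pvStep_eq (d : PySem.Dict String Int) (k : String) :
    (match d.get? k with
     | some v => d.insert k (v + 1)
     | none   => d.insert k 1) = d.insert k (d.getD k 0 + 1) := by
  cases h : d.get? k <;> simp [PySem.Dict.getD_eq_get?_getD, h]

-- ===== VERDICT (by name: the statement is the Claim_ definition above) =====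
theorem solution_spec : Claim_equal_solution := by
  intro clothes _ _
  show solution clothes = solution_alt clothes
  unfold solution solution_alt
  have hstep : (fun (answer : PySem.Dict String Int) (i : List String) =>
      match answer.get? (pvKey i) with
      | some v => answer.insert (pvKey i) (v + 1)
      | none   => answer.insert (pvKey i) 1)
      = fun answer i => answer.insert (pvKey i) (answer.getD (pvKey i) 0 + 1) := by
    funext d i; exact pvStep_eq d (pvKey i)
  rw [hstep]
  have hA : clothes.foldl (fun (d : PySem.Dict String Int) i => d.insert (pvKey i) (d.getD (pvKey i) 0 + 1)) PySem.Dict.empty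
      = PySem.Dict.counter (clothes.map pvKey) := by
    rw [← PySem.Dict.foldl_insert_getD_add_one_eq_counter, List.foldl_map]
  have hB : clothes.foldl (fun ts c => if pvKey c ∈ ts then ts else ts ++ [pvKey c]) ([] : List String)
      = PySem.Set.ofList (clothes.map pvKey) := by
    have h : (fun (ts : List String) (c : List String) => if pvKey c ∈ ts then ts else ts ++ [pvKey c])
        = fun ts c => PySem.Set.add ts (pvKey c) := by
      funext ts c; rw [PySem.Set.add_eq_ite]
    rw [h, PySem.Set.ofList_eq_foldl, List.foldl_map]
  simp only [hA, hB, PySem.Dict.items_counter]
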